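-- pv_equiv track=rewrite | github.com/Manmadeeers/6sem | IS/Code/Lab_4-5/main.py | multiple_permutation_cipher
-- ===== SOURCE A (Python) =====
-- FIRST_NAME = "Илья"
--
-- LAST_NAME = "Филипюк"
--
-- def multiple_permutation_cipher(text, encrypt=True):
--     def get_permute_indices(key):
--         return sorted(range(len(key)), key=lambda k: key[k])
--
--     def encrypt_step(s, key):
--         indices = get_permute_indices(key)
--         cols = len(key)
--         rows = (len(s) + cols - 1) // cols
--         padded = s.ljust(rows * cols)
--         res = ""
--         for idx in indices:
--             for r in range(rows):
--                 res += padded[r * cols + idx]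
--         return res
--
--     def decrypt_step(s, key):
--         indices = get_permute_indices(key)
--         cols = len(key)
--         rows = len(s) // cols
--         matrix = [[None for _ in range(cols)] for _ in range(rows)]
--         idx_in_s = 0
--         for col_idx in indices:
--             for row_idx in range(rows):
--                 matrix[row_idx][col_idx] = s[idx_in_s]
--                 idx_in_s += 1
--         return "".join("".join(row) for row in matrix)
--
--     if encrypt:
--         return encrypt_step(encrypt_step(text, FIRST_NAME), LAST_NAME)
--     else:
--         return decrypt_step(decrypt_step(text, LAST_NAME), FIRST_NAME).strip()
-- ===== SOURCE B (Python) =====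
-- FIRST_NAME = "Илья"
--
-- LAST_NAME = "Филипюк"
--
-- def multiple_permutation_cipher(text, encrypt=True):
--     def get_permute_indices(key):
--         return sorted(range(len(key)), key=lambda k: key[k])
--
--     def encrypt_step(s, key):
--         cols = len(key)
--         rows = (len(s) + cols - 1) // cols
--         padded = s.ljust(rows * cols)
--         grid = [padded[r * cols:(r + 1) * cols] for r in range(rows)]
--         return "".join("".join(row[c] for row in grid) for c in get_permute_indices(key))
--
--     def decrypt_step(s, key):
--         cols = len(key)
--         rows = len(s) // cols
--         columns = [""] * cols
--         for i, c in enumerate(get_permute_indices(key)):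
--             columns[c] = s[i * rows:(i + 1) * rows]
--         return "".join("".join(col[r] for col in columns) for r in range(rows))
--
--     if encrypt:
--         return encrypt_step(encrypt_step(text, FIRST_NAME), LAST_NAME)
--     else:
--         return decrypt_step(decrypt_step(text, LAST_NAME), FIRST_NAME).strip()
-- ===== Notes on version B (the rewrite author's own statement) =====
-- stated objective: alternative
-- what changed: Each transposition step is rebuilt from contiguous slices - encryption builds a row grid and emits the permuted columns by gathering one char per row, decryption places contiguous blocks of the ciphertext into their permuted columns and zips the columns back row by row - replacing A's flat r*cols+idx index loops with string concatenation and its cell-by-cell None-matrix writes.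
import Mathlib
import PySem

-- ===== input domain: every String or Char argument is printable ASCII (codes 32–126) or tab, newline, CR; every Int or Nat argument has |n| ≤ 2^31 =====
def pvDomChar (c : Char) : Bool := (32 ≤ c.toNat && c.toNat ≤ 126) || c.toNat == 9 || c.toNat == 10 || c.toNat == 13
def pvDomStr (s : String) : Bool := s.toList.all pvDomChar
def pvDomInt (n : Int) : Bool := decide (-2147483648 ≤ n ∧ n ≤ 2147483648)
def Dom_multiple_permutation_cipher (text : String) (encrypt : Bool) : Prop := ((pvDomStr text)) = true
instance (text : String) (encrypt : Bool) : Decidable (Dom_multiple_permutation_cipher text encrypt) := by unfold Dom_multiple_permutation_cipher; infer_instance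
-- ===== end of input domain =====

-- B rebuilds each transposition from contiguous slices (a row grid for encryption, permuted
-- column blocks zipped row by row for decryption) instead of A's flat-index loops and
-- cell-by-cell matrix writes; objective: alternative (same cost, different decomposition).

-- module constants (shared by both Python files)
def pvFirstName : List Char := "Илья".toList
def pvLastName : List Char := "Филипюк".toList

-- ===== PORT A =====
-- get_permute_indices: sorted(range(len(key)), key=lambda k: key[k]) (key[k] is in range; pyGetD default unused)
def pvPermIdxA (key : List Char) : List Int :=
  PySem.List.sorted (PySem.List.pyRange 0 (PySem.List.len key) 1)
    (fun k => PySem.List.pyGetD key k ' ') false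

-- encrypt_step; s.ljust(rows*cols) = pad right with spaces (rows*cols ≥ len s always holds here);
-- rows = (len+cols-1)//cols on nonnegative ints is Nat division
def pvEncStepA (s key : List Char) : List Char :=
  let indices := pvPermIdxA key
  let cols := key.length
  let rows := (s.length + cols - 1) / cols
  let padded := s ++ List.replicate (rows * cols - s.length) ' '
  indices.foldl (fun res idx =>
    (PySem.List.pyRange 0 (rows : Int) 1).foldl
      (fun res r => res ++ [PySem.List.pyGetD padded (r * (cols : Int) + idx) ' ']) res) []

-- decrypt_step; the None matrix cells are modelled by ' ' — every cell is overwritten before the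
-- final join (indices is a permutation of range(cols)); idx_in_s is the Nat counter, s[idx_in_s]
-- is always in range (idx_in_s < rows*cols ≤ len s), so List.getD is exact
def pvDecStepA (s key : List Char) : List Char :=
  let indices := pvPermIdxA key
  let cols := key.length
  let rows := s.length / cols
  let matrix : List (List Char) := List.replicate rows (List.replicate cols ' ')
  (indices.foldl (fun (st : List (List Char) × Nat) colIdx =>
    (PySem.List.pyRange 0 (rows : Int) 1).foldl
      (fun (st : List (List Char) × Nat) rowIdx =>
        (PySem.List.pySetD st.1 rowIdx
           (PySem.List.pySetD (PySem.List.pyGetD st.1 rowIdx []) colIdx (s.getD st.2 ' ')),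
         st.2 + 1)) st) (matrix, 0)).1.flatten

def multiple_permutation_cipher (text : String) (encrypt : Bool) : String :=
  if encrypt then
    String.ofList (pvEncStepA (pvEncStepA text.toList pvFirstName) pvLastName)
  else
    String.ofList (PySem.Chars.strip (pvDecStepA (pvDecStepA text.toList pvLastName) pvFirstName))

-- ===== PORT B =====
def pvPermIdxB (key : List Char) : List Int :=
  PySem.List.sorted (PySem.List.pyRange 0 (PySem.List.len key) 1)
    (fun k => PySem.List.pyGetD key k ' ') false

-- encrypt_step: row grid of contiguous slices, then emit the permuted columns
def pvEncStepB (s key : List Char) : List Char :=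
  let cols := key.length
  let rows := (s.length + cols - 1) / cols
  let padded := s ++ List.replicate (rows * cols - s.length) ' '
  let grid := (PySem.List.pyRange 0 (rows : Int) 1).map
    (fun r => PySem.List.slice padded (some (r * (cols : Int))) (some ((r + 1) * (cols : Int))))
  ((pvPermIdxB key).map (fun c => grid.map (fun row => PySem.List.pyGetD row c ' '))).flatten

-- decrypt_step: place contiguous blocks of s into their columns, then zip the columns row by row
def pvDecStepB (s key : List Char) : List Char :=
  let cols := key.length
  let rows := s.length / cols
  let columns := (PySem.List.enumerate (pvPermIdxB key)).foldl
    (fun cs ic => PySem.List.pySetD cs ic.2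
      (PySem.List.slice s (some (ic.1 * (rows : Int))) (some ((ic.1 + 1) * (rows : Int)))))
    (List.replicate cols ([] : List Char))
  ((PySem.List.pyRange 0 (rows : Int) 1).map
    (fun r => columns.map (fun col => PySem.List.pyGetD col r ' '))).flatten

def multiple_permutation_cipher_alt (text : String) (encrypt : Bool) : String :=
  if encrypt then
    String.ofList (pvEncStepB (pvEncStepB text.toList pvFirstName) pvLastName)
  else
    String.ofList (PySem.Chars.strip (pvDecStepB (pvDecStepB text.toList pvLastName) pvFirstName))

-- ===== PRECONDITION & SPEC =====
def Spec_multiple_permutation_cipher (text : String) (encrypt : Bool) (out : String) : Prop := out = multiple_permutation_cipher_alt text encrypt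
instance (text : String) (encrypt : Bool) (out : String) : Decidable (Spec_multiple_permutation_cipher text encrypt out) := by unfold Spec_multiple_permutation_cipher; infer_instance

-- ===== CLAIM (what is proved, stated in full; the proofs are below) =====
def Claim_equal_multiple_permutation_cipher : Prop := ∀ (text : String) (encrypt : Bool), Dom_multiple_permutation_cipher text encrypt → Spec_multiple_permutation_cipher text encrypt (multiple_permutation_cipher text encrypt)

-- ===== LEMMAS AND PROOFS =====

theorem pvEncStep_eq (s key : List Char) : pvEncStepA s key = pvEncStepB s key := by
  unfold pvEncStepA pvEncStepB
  simp only [PySem.List.foldl_append_singleton_eq_map]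
  rw [PySem.List.foldl_append_eq_flatMap, List.nil_append,
      ← List.flatMap_def]
  unfold pvPermIdxA pvPermIdxB
  apply List.flatMap_congr
  intro idx hidx
  have hmem : idx ∈ PySem.List.pyRange 0 (PySem.List.len key) 1 :=
    (PySem.List.mem_sorted ..).mp hidx
  have hb := PySem.List.mem_pyRange_one.mp hmem
  simp only [PySem.List.len_eq] at hb
  obtain ⟨m, rfl⟩ : ∃ m : Nat, idx = (m : Int) := ⟨idx.toNat, (Int.toNat_of_nonneg hb.1).symm⟩
  have hm : m < key.length := by exact_mod_cast hb.2
  rw [List.map_map]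
  apply List.map_congr_left
  intro r hr
  have hr0 : 0 ≤ r := (PySem.List.mem_pyRange_one.mp hr).1
  obtain ⟨n, rfl⟩ : ∃ n : Nat, r = (n : Int) := ⟨r.toNat, (Int.toNat_of_nonneg hr0).symm⟩
  have h1 : (n : Int) * (key.length : Int) + (m : Int) = ((n * key.length + m : Nat) : Int) := by push_cast; ring
  have h2 : ((n : Int) + 1) * (key.length : Int) = (n : Int) * (key.length : Int) + ((key.length : Nat) : Int) := by ring
  have h3 : (n : Int) * (key.length : Int) = ((n * key.length : Nat) : Int) := by push_cast; ring
  rw [h1, Function.comp_apply, h2, h3, PySem.List.slice_natCast_add,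
      PySem.List.pyGetD_natCast, PySem.List.pyGetD_natCast]
  simp only [List.getD_eq_getElem?_getD, List.getElem?_take_of_lt hm, List.getElem?_drop]

theorem pvFillCol (s : List Char) (col : Int) (rows : Nat) (m : List (List Char)) (p : Nat) :
    ((PySem.List.pyRange 0 (rows : Int) 1).foldl
      (fun (st : List (List Char) × Nat) rowIdx =>
        (PySem.List.pySetD st.1 rowIdx
           (PySem.List.pySetD (PySem.List.pyGetD st.1 rowIdx []) col (s.getD st.2 ' ')),
         st.2 + 1)) (m, p)).2 = p + rows ∧
    ((PySem.List.pyRange 0 (rows : Int) 1).foldl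
      (fun (st : List (List Char) × Nat) rowIdx =>
        (PySem.List.pySetD st.1 rowIdx
           (PySem.List.pySetD (PySem.List.pyGetD st.1 rowIdx []) col (s.getD st.2 ' ')),
         st.2 + 1)) (m, p)).1.length = m.length ∧
    ∀ r' : Nat,
      ((PySem.List.pyRange 0 (rows : Int) 1).foldl
        (fun (st : List (List Char) × Nat) rowIdx =>
          (PySem.List.pySetD st.1 rowIdx
             (PySem.List.pySetD (PySem.List.pyGetD st.1 rowIdx []) col (s.getD st.2 ' ')),
           st.2 + 1)) (m, p)).1[r']? =
        if r' < rows then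
          m[r']?.map (fun row => PySem.List.pySetD row col (s.getD (p + r') ' '))
        else m[r']? := by
  induction rows with
  | zero =>
    simp [PySem.List.pyRange_one_eq_nil]
  | succ rows ih =>
    obtain ⟨ih2, ihlen, ih1⟩ := ih
    have hc : ((rows + 1 : Nat) : Int) = (rows : Int) + 1 := by push_cast; ring
    rw [hc, PySem.List.pyRange_one_succ_right (by positivity), List.foldl_append,
        List.foldl_cons, List.foldl_nil]
    set st := ((PySem.List.pyRange 0 (rows : Int) 1).foldl
      (fun (st : List (List Char) × Nat) rowIdx =>
        (PySem.List.pySetD st.1 rowIdx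
           (PySem.List.pySetD (PySem.List.pyGetD st.1 rowIdx []) col (s.getD st.2 ' ')),
         st.2 + 1)) (m, p)) with hst
    refine ⟨by simp [ih2]; omega, ?_, ?_⟩
    · simp [PySem.List.pySetD_natCast, ihlen]
    · intro r'
      rw [PySem.List.pySetD_natCast, PySem.List.pyGetD_natCast, ih2]
      rw [List.getElem?_set]
      by_cases h1 : rows = r'
      · subst h1
        simp only [ih1, if_neg (lt_irrefl rows), if_pos (Nat.lt_succ_self rows)]
        by_cases h2 : rows < st.1.length
        · rw [if_pos h2]
          have hm : rows < m.length := ihlen ▸ h2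
          simp [List.getD_eq_getElem?_getD, ih1, List.getElem?_eq_getElem hm]
        · rw [if_neg h2]
          have hm : m.length ≤ rows := by
            have := ihlen ▸ h2; omega
          simp [List.getElem?_eq_none_iff.mpr hm]
      · rw [if_neg h1, ih1]
        by_cases h3 : r' < rows
        · rw [if_pos h3, if_pos (by omega)]
        · rw [if_neg h3, if_neg (by omega)]

def pvRowSets (s : List Char) (rows : Nat) : List Int → Nat → Nat → List Char → List Char
  | [], _, _, row => row
  | c :: t, p, r', row =>
      pvRowSets s rows t (p + rows) r' (PySem.List.pySetD row c (s.getD (p + r') ' '))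

theorem pvFillAll (s : List Char) (rows : Nat) (inds : List Int) :
    ∀ (m : List (List Char)) (p : Nat),
      (inds.foldl (fun (st : List (List Char) × Nat) colIdx =>
        (PySem.List.pyRange 0 (rows : Int) 1).foldl
          (fun (st : List (List Char) × Nat) rowIdx =>
            (PySem.List.pySetD st.1 rowIdx
               (PySem.List.pySetD (PySem.List.pyGetD st.1 rowIdx []) colIdx (s.getD st.2 ' ')),
             st.2 + 1)) st) (m, p)).1.length = m.length ∧
      ∀ r' : Nat,
        (inds.foldl (fun (st : List (List Char) × Nat) colIdx =>
          (PySem.List.pyRange 0 (rows : Int) 1).foldl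
            (fun (st : List (List Char) × Nat) rowIdx =>
              (PySem.List.pySetD st.1 rowIdx
                 (PySem.List.pySetD (PySem.List.pyGetD st.1 rowIdx []) colIdx (s.getD st.2 ' ')),
               st.2 + 1)) st) (m, p)).1[r']? =
          if r' < rows then m[r']?.map (pvRowSets s rows inds p r') else m[r']? := by
  induction inds with
  | nil =>
    intro m p
    refine ⟨rfl, fun r' => ?_⟩
    simp [pvRowSets]
  | cons c t ih =>
    intro m p
    rw [List.foldl_cons]
    obtain ⟨hlen, h1⟩ := pvFillCol s c rows m p |>.2
    have h2 := (pvFillCol s c rows m p).1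
    generalize hst : (PySem.List.pyRange 0 (rows : Int) 1).foldl
        (fun (st : List (List Char) × Nat) rowIdx =>
          (PySem.List.pySetD st.1 rowIdx
             (PySem.List.pySetD (PySem.List.pyGetD st.1 rowIdx []) c (s.getD st.2 ' ')),
           st.2 + 1)) (m, p) = st1 at h2 hlen h1 ⊢
    rw [← Prod.mk.eta (p := st1), h2]
    refine ⟨((ih _ _).1).trans hlen, fun r' => ?_⟩
    have hr := (ih st1.1 (p + rows)).2 r'
    rw [h1 r'] at hr
    refine hr.trans ?_
    by_cases h : r' < rows
    · simp only [if_pos h, Option.map_map]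
      rfl
    · simp only [if_neg h]

theorem pvDecA_eq (s key : List Char) :
    pvDecStepA s key =
      ((List.range (s.length / key.length)).map
        (fun r' => pvRowSets s (s.length / key.length) (pvPermIdxA key) 0 r'
          (List.replicate key.length ' '))).flatten := by
  unfold pvDecStepA
  dsimp only
  obtain ⟨hlen, hget⟩ := pvFillAll s (s.length / key.length) (pvPermIdxA key)
      (List.replicate (s.length / key.length) (List.replicate key.length ' ')) 0
  congr 1
  refine List.ext_getElem? fun i => ?_
  rw [hget i]
  by_cases h : i < s.length / key.length
  · simp [h]
  · simp [h]

theorem pvSliceEntry (s : List Char) (rows r' : Nat) (h : r' < rows) (a b : Int) (i : Nat)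
    (ha : a = ((i * rows : Nat) : Int)) (hb : b = ((i * rows : Nat) : Int) + ((rows : Nat) : Int)) :
    PySem.List.pyGetD (PySem.List.slice s (some a) (some b)) ((r' : Nat) : Int) ' '
      = s.getD (i * rows + r') ' ' := by
  rw [ha, hb, PySem.List.slice_natCast_add, PySem.List.pyGetD_natCast]
  simp [List.getD_eq_getElem?_getD, List.getElem?_take_of_lt h, List.getElem?_drop]

theorem pvGetDCongr (s : List Char) (a b : Nat) (h : a = b) : s.getD a ' ' = s.getD b ' ' := by rw [h]

set_option maxHeartbeats 1000000 in
theorem pvDecStep_last (s : List Char) : pvDecStepA s pvLastName = pvDecStepB s pvLastName := by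
  have hB : pvPermIdxB pvLastName = [0,1,3,6,2,4,5] := by decide
  rw [pvDecA_eq, show pvPermIdxA pvLastName = [0,1,3,6,2,4,5] from by decide,
      show pvLastName.length = 7 from rfl]
  unfold pvDecStepB
  dsimp only
  rw [hB, show pvLastName.length = 7 from rfl]
  rw [show (PySem.List.enumerate [(0:Int),1,3,6,2,4,5]).foldl
      (fun cs ic => PySem.List.pySetD cs ic.2
        (PySem.List.slice s (some (ic.1 * ((s.length / 7 : Nat) : Int)))
          (some ((ic.1 + 1) * ((s.length / 7 : Nat) : Int)))))
      (List.replicate 7 ([] : List Char)) =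
    [PySem.List.slice s (some ((0:Int) * ((s.length / 7 : Nat):Int))) (some (((0:Int)+1) * ((s.length / 7 : Nat):Int))),
     PySem.List.slice s (some ((1:Int) * ((s.length / 7 : Nat):Int))) (some (((1:Int)+1) * ((s.length / 7 : Nat):Int))),
     PySem.List.slice s (some ((4:Int) * ((s.length / 7 : Nat):Int))) (some (((4:Int)+1) * ((s.length / 7 : Nat):Int))),
     PySem.List.slice s (some ((2:Int) * ((s.length / 7 : Nat):Int))) (some (((2:Int)+1) * ((s.length / 7 : Nat):Int))),
     PySem.List.slice s (some ((5:Int) * ((s.length / 7 : Nat):Int))) (some (((5:Int)+1) * ((s.length / 7 : Nat):Int))),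
     PySem.List.slice s (some ((6:Int) * ((s.length / 7 : Nat):Int))) (some (((6:Int)+1) * ((s.length / 7 : Nat):Int))),
     PySem.List.slice s (some ((3:Int) * ((s.length / 7 : Nat):Int))) (some (((3:Int)+1) * ((s.length / 7 : Nat):Int)))]
    from rfl]
  rw [PySem.List.pyRange_zero_nat, List.map_map]
  congr 1
  apply List.map_congr_left
  intro r' hr'
  have hr : r' < s.length / 7 := List.mem_range.mp hr'
  refine Eq.trans (show _ =
    [s.getD (0+r') ' ', s.getD (0+(s.length/7)+r') ' ',
     s.getD (0+(s.length/7)+(s.length/7)+(s.length/7)+(s.length/7)+r') ' ',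
     s.getD (0+(s.length/7)+(s.length/7)+r') ' ',
     s.getD (0+(s.length/7)+(s.length/7)+(s.length/7)+(s.length/7)+(s.length/7)+r') ' ',
     s.getD (0+(s.length/7)+(s.length/7)+(s.length/7)+(s.length/7)+(s.length/7)+(s.length/7)+r') ' ',
     s.getD (0+(s.length/7)+(s.length/7)+(s.length/7)+r') ' '] from rfl) ?_
  simp only [Function.comp_apply, List.map_cons, List.map_nil, List.cons.injEq, and_true]
  refine ⟨?_, ?_, ?_, ?_, ?_, ?_, ?_⟩
  · exact Eq.trans (pvGetDCongr s _ (0 * (s.length / 7) + r') (by omega))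
      (pvSliceEntry s (s.length / 7) r' hr _ _ 0 (by push_cast; ring) (by push_cast; ring)).symm
  · exact Eq.trans (pvGetDCongr s _ (1 * (s.length / 7) + r') (by omega))
      (pvSliceEntry s (s.length / 7) r' hr _ _ 1 (by push_cast; ring) (by push_cast; ring)).symm
  · exact Eq.trans (pvGetDCongr s _ (4 * (s.length / 7) + r') (by omega))
      (pvSliceEntry s (s.length / 7) r' hr _ _ 4 (by push_cast; ring) (by push_cast; ring)).symm
  · exact Eq.trans (pvGetDCongr s _ (2 * (s.length / 7) + r') (by omega))
      (pvSliceEntry s (s.length / 7) r' hr _ _ 2 (by push_cast; ring) (by push_cast; ring)).symm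
  · exact Eq.trans (pvGetDCongr s _ (5 * (s.length / 7) + r') (by omega))
      (pvSliceEntry s (s.length / 7) r' hr _ _ 5 (by push_cast; ring) (by push_cast; ring)).symm
  · exact Eq.trans (pvGetDCongr s _ (6 * (s.length / 7) + r') (by omega))
      (pvSliceEntry s (s.length / 7) r' hr _ _ 6 (by push_cast; ring) (by push_cast; ring)).symm
  · exact Eq.trans (pvGetDCongr s _ (3 * (s.length / 7) + r') (by omega))
      (pvSliceEntry s (s.length / 7) r' hr _ _ 3 (by push_cast; ring) (by push_cast; ring)).symm

set_option maxHeartbeats 1000000 in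
theorem pvDecStep_first (s : List Char) : pvDecStepA s pvFirstName = pvDecStepB s pvFirstName := by
  have hB : pvPermIdxB pvFirstName = [0,1,2,3] := by decide
  rw [pvDecA_eq, show pvPermIdxA pvFirstName = [0,1,2,3] from by decide,
      show pvFirstName.length = 4 from rfl]
  unfold pvDecStepB
  dsimp only
  rw [hB, show pvFirstName.length = 4 from rfl]
  rw [show (PySem.List.enumerate [(0:Int),1,2,3]).foldl
      (fun cs ic => PySem.List.pySetD cs ic.2
        (PySem.List.slice s (some (ic.1 * ((s.length / 4 : Nat) : Int)))
          (some ((ic.1 + 1) * ((s.length / 4 : Nat) : Int)))))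
      (List.replicate 4 ([] : List Char)) =
    [PySem.List.slice s (some ((0:Int) * ((s.length / 4 : Nat):Int))) (some (((0:Int)+1) * ((s.length / 4 : Nat):Int))),
     PySem.List.slice s (some ((1:Int) * ((s.length / 4 : Nat):Int))) (some (((1:Int)+1) * ((s.length / 4 : Nat):Int))),
     PySem.List.slice s (some ((2:Int) * ((s.length / 4 : Nat):Int))) (some (((2:Int)+1) * ((s.length / 4 : Nat):Int))),
     PySem.List.slice s (some ((3:Int) * ((s.length / 4 : Nat):Int))) (some (((3:Int)+1) * ((s.length / 4 : Nat):Int)))]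
    from rfl]
  rw [PySem.List.pyRange_zero_nat, List.map_map]
  congr 1
  apply List.map_congr_left
  intro r' hr'
  have hr : r' < s.length / 4 := List.mem_range.mp hr'
  refine Eq.trans (show _ =
    [s.getD (0+r') ' ', s.getD (0+(s.length/4)+r') ' ',
     s.getD (0+(s.length/4)+(s.length/4)+r') ' ',
     s.getD (0+(s.length/4)+(s.length/4)+(s.length/4)+r') ' '] from rfl) ?_
  simp only [Function.comp_apply, List.map_cons, List.map_nil, List.cons.injEq, and_true]
  refine ⟨?_, ?_, ?_, ?_⟩
  · exact Eq.trans (pvGetDCongr s _ (0 * (s.length / 4) + r') (by omega))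
      (pvSliceEntry s (s.length / 4) r' hr _ _ 0 (by push_cast; ring) (by push_cast; ring)).symm
  · exact Eq.trans (pvGetDCongr s _ (1 * (s.length / 4) + r') (by omega))
      (pvSliceEntry s (s.length / 4) r' hr _ _ 1 (by push_cast; ring) (by push_cast; ring)).symm
  · exact Eq.trans (pvGetDCongr s _ (2 * (s.length / 4) + r') (by omega))
      (pvSliceEntry s (s.length / 4) r' hr _ _ 2 (by push_cast; ring) (by push_cast; ring)).symm
  · exact Eq.trans (pvGetDCongr s _ (3 * (s.length / 4) + r') (by omega))
      (pvSliceEntry s (s.length / 4) r' hr _ _ 3 (by push_cast; ring) (by push_cast; ring)).symm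

-- ===== VERDICT (by name: the statement is the Claim_ definition above) =====
theorem multiple_permutation_cipher_spec : Claim_equal_multiple_permutation_cipher := by
  intro text encrypt _
  unfold Spec_multiple_permutation_cipher multiple_permutation_cipher multiple_permutation_cipher_alt
  cases encrypt <;> simp [pvEncStep_eq, pvDecStep_first, pvDecStep_last]
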